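-- pv_equiv track=rewrite | github.com/anonymous-png/multfs | extract_class.py | gen_rarity_dist
-- ===== SOURCE A (Python) =====
-- def gen_rarity_dist(dictio):
-- 	rarity_num_dictio = {}
-- 	for value, rarity in dictio.items():
-- 		if rarity in rarity_num_dictio.keys():
-- 			rarity_num_dictio[rarity] += 1
-- 		else:
-- 			rarity_num_dictio[rarity] = 1
--
-- 	lst_dist = [(rarity,repetitions) for rarity,repetitions in rarity_num_dictio.items()]
-- 	lst_dist = sorted(lst_dist, key=lambda x: x[0], reverse=False)
-- 	return lst_dist
-- ===== SOURCE B (Python) =====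
-- def gen_rarity_dist(dictio):
-- 	# sort the rarity values first, then count each run of equal values in one scan
-- 	rarities = sorted(dictio.values())
-- 	out = []
-- 	i = 0
-- 	n = len(rarities)
-- 	while i < n:
-- 		j = i
-- 		while j < n and rarities[j] == rarities[i]:
-- 			j += 1
-- 		out.append((rarities[i], j - i))
-- 		i = j
-- 	return out
-- ===== Notes on version B (the rewrite author's own statement) =====
-- stated objective: alternative
-- what changed: Replaces A's dict-based frequency counting followed by sorting the (rarity,count) pairs with sort-first-then-group: sort the raw rarity list and count consecutive runs in a single scan, with no dictionary at all.
import Mathlib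
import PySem

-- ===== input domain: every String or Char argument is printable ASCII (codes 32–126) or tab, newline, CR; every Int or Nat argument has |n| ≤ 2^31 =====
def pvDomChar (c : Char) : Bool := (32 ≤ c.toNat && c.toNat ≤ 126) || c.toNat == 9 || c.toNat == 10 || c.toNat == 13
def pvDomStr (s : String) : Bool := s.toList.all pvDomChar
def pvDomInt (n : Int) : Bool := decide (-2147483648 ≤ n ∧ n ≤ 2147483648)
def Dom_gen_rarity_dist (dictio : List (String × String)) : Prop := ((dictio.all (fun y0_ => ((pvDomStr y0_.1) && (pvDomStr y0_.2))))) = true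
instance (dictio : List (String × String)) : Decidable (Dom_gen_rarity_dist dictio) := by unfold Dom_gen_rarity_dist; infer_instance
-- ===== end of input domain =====

-- B sorts the raw rarity values and counts consecutive runs in one scan, instead of
-- A's dict-based counting followed by sorting the (rarity, count) pairs (alternative
-- decomposition, similar cost).

-- ===== PORT A =====
-- the for-loop building rarity_num_dictio, then the list comprehension, then sorted
def gen_rarity_dist (dictio : List (String × String)) : List (String × Int) :=
  PySem.List.sorted
    ((dictio.foldl (fun d p =>
        if d.contains p.2 then d.insert p.2 (d.getD p.2 0 + 1)  -- rarity_num_dictio[rarity] += 1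
        else d.insert p.2 1) PySem.Dict.empty).items.map (fun x => (x.1, x.2)))
    (fun x => x.1) false

-- ===== PORT B =====
-- the outer/inner while loops of Source B: the inner j-scan counts the run of values
-- equal to rarities[i] (takeWhile), advancing i to j is dropWhile (exact)
def pvGroupRuns : List String → List (String × Int)
  | [] => []
  | x :: xs =>
    (x, 1 + ((xs.takeWhile (fun r => r == x)).length : Int)) ::
      pvGroupRuns (xs.dropWhile (fun r => r == x))
termination_by l => l.length
decreasing_by
  exact Nat.lt_succ_of_le (List.length_dropWhile_le _ _)

def gen_rarity_dist_alt (dictio : List (String × String)) : List (String × Int) :=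
  pvGroupRuns (PySem.List.sorted (dictio.map (·.2)) (fun x => x) false)

-- ===== PRECONDITION & SPEC =====
def Spec_gen_rarity_dist (dictio : List (String × String)) (out : List (String × Int)) : Prop := out = gen_rarity_dist_alt dictio
instance (dictio : List (String × String)) (out : List (String × Int)) : Decidable (Spec_gen_rarity_dist dictio out) := by unfold Spec_gen_rarity_dist; infer_instance

-- ===== CLAIM (what is proved, stated in full; the proofs are below) =====
def Claim_equal_gen_rarity_dist : Prop := ∀ (dictio : List (String × String)), Dom_gen_rarity_dist dictio → Spec_gen_rarity_dist dictio (gen_rarity_dist dictio)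

-- ===== LEMMAS AND PROOFS =====

-- A's loop step equals the canonical counter step
theorem pvStepEq :
    (fun (d : PySem.Dict String Int) (p : String × String) =>
      if d.contains p.2 then d.insert p.2 (d.getD p.2 0 + 1) else d.insert p.2 1)
    = (fun d p => d.insert p.2 (d.getD p.2 0 + 1)) := by
  funext d p
  by_cases h : d.contains p.2
  · simp [h]
  · have hn : d.get? p.2 = none := by
      cases hg : d.get? p.2 with
      | none => rfl
      | some v =>
        exfalso
        apply h
        rw [PySem.Dict.contains_eq_isSome_get?, hg]
        rfl
    simp [h, PySem.Dict.getD, hn]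

-- the head of a dropWhile fails the predicate
theorem pvHeadDrop (p : String → Bool) (xs : List String) (z : String) (t : List String)
    (h : xs.dropWhile p = z :: t) : p z = false := by
  induction xs with
  | nil => simp at h
  | cons a l ih =>
    rw [List.dropWhile_cons] at h
    split at h
    · exact ih h
    · next hpa =>
      cases h
      simpa using hpa

-- every element of xs.dropWhile (· == x) is strictly greater than x, for sorted xs with x ≤ all of xs
theorem pvDropGt (x : String) (xs : List String) (hp : xs.Pairwise (· ≤ ·))
    (hle : ∀ y ∈ xs, x ≤ y) :
    ∀ y ∈ xs.dropWhile (fun r => r == x), x < y := by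
  intro y hy
  have hsub : (xs.dropWhile (fun r => r == x)).Sublist xs := List.dropWhile_sublist _
  cases hd : xs.dropWhile (fun r => r == x) with
  | nil => rw [hd] at hy; simp at hy
  | cons z t =>
    rw [hd] at hy hsub
    have hz : ((z == x) : Bool) = false := pvHeadDrop _ xs z t hd
    have hzx : z ≠ x := by simpa using hz
    have hpz : (z :: t).Pairwise (· ≤ ·) := hp.sublist hsub
    have hzle : z ≤ y := by
      rcases List.mem_cons.mp hy with hy | hy
      · exact le_of_eq hy.symm
      · exact (List.pairwise_cons.mp hpz).1 y hy
    have hxz : x < z := lt_of_le_of_ne (hle z (hsub.subset List.mem_cons_self)) (Ne.symm hzx)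
    exact lt_of_lt_of_le hxz hzle

-- pushing a fresh element through a fold of Set.add
theorem pvFoldlAddCons (d : List String) (x : String) (s : List String) (hx : x ∉ d) :
    d.foldl PySem.Set.add (x :: s) = x :: d.foldl PySem.Set.add s := by
  induction d generalizing s with
  | nil => rfl
  | cons z t ih =>
    have hzx : z ≠ x := fun h => hx (by simp [h])
    have hstep : PySem.Set.add (x :: s) z = x :: PySem.Set.add s z := by
      by_cases hs : z ∈ s <;>
        simp [PySem.Set.add, PySem.Set.contains, hzx, hs]
    rw [List.foldl_cons, hstep, List.foldl_cons, ih (PySem.Set.add s z) (fun h => hx (List.mem_cons_of_mem _ h))]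

-- folding Set.add over a run of copies of x starting from [x] is a no-op
theorem pvFoldlAddRun (t : List String) (x : String) (d : List String) (ht : ∀ y ∈ t, y = x) :
    (t ++ d).foldl PySem.Set.add [x] = d.foldl PySem.Set.add [x] := by
  induction t with
  | nil => rfl
  | cons z ts ih =>
    have hz : z = x := ht z List.mem_cons_self
    have hstep : PySem.Set.add [x] z = [x] := by
      simp [PySem.Set.add, PySem.Set.contains, hz]
    rw [List.cons_append, List.foldl_cons, hstep]
    exact ih (fun y hy => ht y (List.mem_cons_of_mem _ hy))

-- PySem.Set.ofList over x :: (run of x) ++ d, with x ∉ d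
theorem pvOfListRun (x : String) (t d : List String) (ht : ∀ y ∈ t, y = x) (hd : x ∉ d) :
    PySem.Set.ofList (x :: (t ++ d)) = x :: PySem.Set.ofList d := by
  rw [PySem.Set.ofList_eq_foldl, PySem.Set.ofList_eq_foldl]
  show (t ++ d).foldl PySem.Set.add (PySem.Set.add [] x) = x :: d.foldl PySem.Set.add []
  have h0 : PySem.Set.add [] x = [x] := rfl
  rw [h0, pvFoldlAddRun t x d ht, pvFoldlAddCons d x [] hd]

-- the characterisation of B's grouping pass on a sorted list
theorem pvGroupRunsEq (l : List String) (hp : l.Pairwise (· ≤ ·)) :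
    pvGroupRuns l = (PySem.Set.ofList l).map (fun k => (k, (l.count k : Int))) := by
  induction l using pvGroupRuns.induct with
  | case1 => rw [pvGroupRuns]; rfl
  | case2 x xs ih =>
    have hle : ∀ y ∈ xs, x ≤ y := (List.pairwise_cons.mp hp).1
    have hpxs : xs.Pairwise (· ≤ ·) := (List.pairwise_cons.mp hp).2
    set t := xs.takeWhile (fun r => r == x) with htdef
    set d := xs.dropWhile (fun r => r == x) with hddef
    have hxs : xs = t ++ d := (List.takeWhile_append_dropWhile).symm
    have ht : ∀ y ∈ t, y = x := by
      intro y hy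
      have := List.mem_takeWhile_imp hy
      simpa using this
    have hdgt : ∀ y ∈ d, x < y := pvDropGt x xs hpxs hle
    have hxd : x ∉ d := fun h => lt_irrefl x (hdgt x h)
    have hpd : d.Pairwise (· ≤ ·) := hpxs.sublist (List.dropWhile_sublist _)
    have h1 : t.count x = t.length := List.count_eq_length.mpr (fun y hy => (ht y hy).symm)
    have h2 : d.count x = 0 := List.count_eq_zero.mpr hxd
    have hcx : (x :: xs).count x = 1 + t.length := by
      rw [hxs, List.count_cons_self, List.count_append, h1, h2]
      omega
    have hck : ∀ k ∈ d, (x :: xs).count k = d.count k := by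
      intro k hk
      have hkx : k ≠ x := fun h => lt_irrefl x (h ▸ hdgt k hk)
      have h3 : t.count k = 0 := List.count_eq_zero.mpr (fun h => hkx (ht k h))
      rw [hxs]
      simp [List.count_append, h3, Ne.symm hkx]
    have hof : PySem.Set.ofList (x :: xs) = x :: PySem.Set.ofList d := by
      rw [hxs]; exact pvOfListRun x t d ht hxd
    rw [pvGroupRuns, ih hpd, hof, List.map_cons]
    congr 1
    · rw [← htdef, hcx]; push_cast; ring_nf
    · apply List.map_congr_left
      intro k hk
      have hkd : k ∈ d := (PySem.Set.mem_ofList _ _).mp hk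
      rw [hck k hkd]

-- every first component produced by pvGroupRuns is an element of the input
theorem pvGroupRunsFstMem (l : List String) : ∀ p ∈ pvGroupRuns l, p.1 ∈ l := by
  induction l using pvGroupRuns.induct with
  | case1 => intro p hp; rw [pvGroupRuns] at hp; simp at hp
  | case2 x xs ih =>
    intro p hp
    rw [pvGroupRuns] at hp
    rcases List.mem_cons.mp hp with hp | hp
    · simp [hp]
    · exact List.mem_cons_of_mem x ((List.dropWhile_sublist _).subset (ih p hp))

-- the firsts of pvGroupRuns on a sorted list are strictly increasing
theorem pvGroupRunsPairwise (l : List String) (hp : l.Pairwise (· ≤ ·)) :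
    (pvGroupRuns l).Pairwise (fun a b => a.1 < b.1) := by
  induction l using pvGroupRuns.induct with
  | case1 => rw [pvGroupRuns]; exact List.Pairwise.nil
  | case2 x xs ih =>
    have hle : ∀ y ∈ xs, x ≤ y := (List.pairwise_cons.mp hp).1
    have hpxs : xs.Pairwise (· ≤ ·) := (List.pairwise_cons.mp hp).2
    have hpd : (xs.dropWhile (fun r => r == x)).Pairwise (· ≤ ·) :=
      hpxs.sublist (List.dropWhile_sublist _)
    rw [pvGroupRuns]
    refine List.pairwise_cons.mpr ⟨?_, ih hpd⟩
    intro p hp'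
    exact pvDropGt x xs hpxs hle p.1 (pvGroupRunsFstMem _ p hp')

-- ===== VERDICT (by name: the statement is the Claim_ definition above) =====
theorem gen_rarity_dist_spec : Claim_equal_gen_rarity_dist := by
  intro dictio _
  show gen_rarity_dist dictio = gen_rarity_dist_alt dictio
  unfold gen_rarity_dist gen_rarity_dist_alt
  set rs := dictio.map (·.2) with hrs
  set srs := PySem.List.sorted rs (fun x => x) false with hsrs
  -- A's dict is the canonical counter of rs
  have hfold : dictio.foldl (fun d p =>
      if d.contains p.2 then d.insert p.2 (d.getD p.2 0 + 1) else d.insert p.2 1)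
      PySem.Dict.empty = PySem.Dict.counter rs := by
    rw [pvStepEq, ← PySem.Dict.foldl_insert_getD_add_one_eq_counter, hrs, List.foldl_map]
  rw [hfold, PySem.Dict.items_counter]
  have hmapid : ((PySem.Set.ofList rs).map (fun k => (k, (rs.count k : Int)))).map
      (fun x => (x.1, x.2)) = (PySem.Set.ofList rs).map (fun k => (k, (rs.count k : Int))) := by
    simp
  rw [hmapid]
  -- B's side: characterise the grouping pass
  have hpsrs : srs.Pairwise (· ≤ ·) := by
    have := PySem.List.sorted_pairwise rs (fun x => x)
    simpa using this
  have hperm : srs.Perm rs := PySem.List.sorted_perm rs (fun x => x) false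
  have hB : pvGroupRuns srs
      = (PySem.Set.ofList srs).map (fun k => (k, (rs.count k : Int))) := by
    rw [pvGroupRunsEq srs hpsrs]
    apply List.map_congr_left
    intro k _
    rw [hperm.count_eq]
  -- the two key lists are permutations of each other
  have hkperm : (PySem.Set.ofList srs).Perm (PySem.Set.ofList rs) := by
    rw [List.perm_ext_iff_of_nodup (PySem.Set.nodup_ofList _) (PySem.Set.nodup_ofList _)]
    intro a
    rw [PySem.Set.mem_ofList, PySem.Set.mem_ofList, hperm.mem_iff]
  have hBperm : (pvGroupRuns srs).Perm
      ((PySem.Set.ofList rs).map (fun k => (k, (rs.count k : Int)))) := by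
    rw [hB]; exact hkperm.map _
  exact PySem.List.sorted_eq_of_perm_of_pairwise_lt _ _ _ hBperm
    (pvGroupRunsPairwise srs hpsrs)
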